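-- pv_equiv track=rewrite | github.com/Gczmy/Blood-On-The-Clocktower | main.py | soothsayer
-- ===== SOURCE A (Python) =====
-- Demon = ["小恶魔"]
--
-- def soothsayer(players_info, Soothsayer_player_1, Soothsayer_player_2):
--     """
--     占卜师
--     每晚都可选择2名玩家得知其中是否存在恶魔身份。但在游戏开始时，会有一名随机玩家（无论身份）被占卜师视为恶魔直到游戏结束，占卜师不知道其真实身份。
--     返回：[选择的玩家1, 选择的玩家2, 是否存在恶魔身份]
--     """
--     role_1 = [v[1] for k, v in players_info.items() if v[0] == Soothsayer_player_1][0]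
--     role_2 = [v[1] for k, v in players_info.items() if v[0] == Soothsayer_player_2][0]
--     player_1 = [k for k, v in players_info.items() if v[0] == Soothsayer_player_1][0]
--     player_2 = [k for k, v in players_info.items() if v[0] == Soothsayer_player_2][0]
--     if role_1 in Demon or role_2 in Demon:
--         result = " 中存在恶魔身份"
--     else:
--         result = " 中不存在恶魔身份"
--     return [player_1 + " 和 " + player_2 + result]
-- ===== SOURCE B (Python) =====
-- Demon = ["小恶魔"]
--
-- def soothsayer(players_info, Soothsayer_player_1, Soothsayer_player_2):
--     # One pass: index first occurrence of each v[0] -> (key, whole value),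
--     # then resolve both players by dict lookup.
--     idx = {}
--     for k, v in players_info.items():
--         if v[0] not in idx:
--             idx[v[0]] = (k, v)
--     player_1, v1 = idx[Soothsayer_player_1]
--     player_2, v2 = idx[Soothsayer_player_2]
--     role_1 = v1[1]
--     role_2 = v2[1]
--     if role_1 in Demon or role_2 in Demon:
--         result = " 中存在恶魔身份"
--     else:
--         result = " 中不存在恶魔身份"
--     return [player_1 + " 和 " + player_2 + result]
-- ===== Notes on version B (the rewrite author's own statement) =====
-- stated objective: simpler
-- what changed: A runs four separate list comprehensions over the items (two per player); B builds a first-occurrence index dict keyed by v[0] in one pass and resolves both players by lookup.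
import Mathlib
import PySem

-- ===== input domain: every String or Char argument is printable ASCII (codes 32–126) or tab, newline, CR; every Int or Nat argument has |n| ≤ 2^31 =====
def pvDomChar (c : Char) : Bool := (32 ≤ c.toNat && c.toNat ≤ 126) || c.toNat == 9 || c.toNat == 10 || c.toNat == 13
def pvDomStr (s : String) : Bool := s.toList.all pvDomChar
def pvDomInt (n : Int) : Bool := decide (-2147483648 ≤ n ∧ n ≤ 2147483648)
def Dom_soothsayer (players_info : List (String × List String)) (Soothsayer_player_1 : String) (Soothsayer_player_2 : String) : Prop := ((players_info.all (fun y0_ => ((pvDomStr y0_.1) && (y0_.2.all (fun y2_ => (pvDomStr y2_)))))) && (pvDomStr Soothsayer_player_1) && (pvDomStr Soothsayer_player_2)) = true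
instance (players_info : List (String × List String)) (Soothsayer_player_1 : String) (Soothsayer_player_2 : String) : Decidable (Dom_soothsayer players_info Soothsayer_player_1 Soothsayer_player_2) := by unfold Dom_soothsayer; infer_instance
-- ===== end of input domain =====

-- B replaces A's four comprehension passes by one indexing pass over the dict plus two lookups (objective: simpler).

-- ===== PORT A =====
def Demon : List String := ["小恶魔"]

def soothsayer (players_info : List (String × List String)) (Soothsayer_player_1 : String) (Soothsayer_player_2 : String) : List String :=
  let role_1 := ((players_info.filter (fun kv => PySem.List.pyGet? kv.2 0 == some Soothsayer_player_1)).map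
      (fun kv => (PySem.List.pyGet? kv.2 1).getD "")).head?.getD ""
  let role_2 := ((players_info.filter (fun kv => PySem.List.pyGet? kv.2 0 == some Soothsayer_player_2)).map
      (fun kv => (PySem.List.pyGet? kv.2 1).getD "")).head?.getD ""
  let player_1 := ((players_info.filter (fun kv => PySem.List.pyGet? kv.2 0 == some Soothsayer_player_1)).map
      (fun kv => kv.1)).head?.getD ""
  let player_2 := ((players_info.filter (fun kv => PySem.List.pyGet? kv.2 0 == some Soothsayer_player_2)).map
      (fun kv => kv.1)).head?.getD ""
  let result := if role_1 ∈ Demon ∨ role_2 ∈ Demon then " 中存在恶魔身份" else " 中不存在恶魔身份"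
  [player_1 ++ " 和 " ++ player_2 ++ result]

-- ===== PORT B =====
def soothsayer_alt (players_info : List (String × List String)) (Soothsayer_player_1 : String) (Soothsayer_player_2 : String) : List String :=
  let idx : PySem.Dict String (String × List String) :=
    players_info.foldl (fun d kv =>
      let key := (PySem.List.pyGet? kv.2 0).getD ""
      if d.contains key then d else d.insert key (kv.1, kv.2)) PySem.Dict.empty
  let e1 := (idx.get? Soothsayer_player_1).getD ("", [])
  let e2 := (idx.get? Soothsayer_player_2).getD ("", [])
  let role_1 := (PySem.List.pyGet? e1.2 1).getD ""
  let role_2 := (PySem.List.pyGet? e2.2 1).getD ""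
  let result := if role_1 ∈ Demon ∨ role_2 ∈ Demon then " 中存在恶魔身份" else " 中不存在恶魔身份"
  [e1.1 ++ " 和 " ++ e2.1 ++ result]

-- ===== PRECONDITION & SPEC =====
-- Pre_ excludes exactly the inputs on which the Python A raises IndexError: some role list is
-- empty (v[0] raises), a queried player has no matching entry ([...][0] raises), or a matching
-- entry has fewer than 2 fields (v[1] raises).
def Pre_soothsayer (players_info : List (String × List String)) (Soothsayer_player_1 : String) (Soothsayer_player_2 : String) : Prop :=
  (∀ kv ∈ players_info, kv.2 ≠ []) ∧
  (∃ kv ∈ players_info, kv.2.head? = some Soothsayer_player_1) ∧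
  (∃ kv ∈ players_info, kv.2.head? = some Soothsayer_player_2) ∧
  (∀ kv ∈ players_info, (kv.2.head? = some Soothsayer_player_1 ∨ kv.2.head? = some Soothsayer_player_2) → 2 ≤ kv.2.length)
instance (players_info : List (String × List String)) (Soothsayer_player_1 : String) (Soothsayer_player_2 : String) : Decidable (Pre_soothsayer players_info Soothsayer_player_1 Soothsayer_player_2) := by unfold Pre_soothsayer; infer_instance

def pvWitness_soothsayer : (List (String × List String)) × String × String :=
  ([("p1", ["alice", "imp"]), ("p2", ["bob", "villager"])], "alice", "bob")

def Spec_soothsayer (players_info : List (String × List String)) (Soothsayer_player_1 : String) (Soothsayer_player_2 : String) (out : List String) : Prop := out = soothsayer_alt players_info Soothsayer_player_1 Soothsayer_player_2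
instance (players_info : List (String × List String)) (Soothsayer_player_1 : String) (Soothsayer_player_2 : String) (out : List String) : Decidable (Spec_soothsayer players_info Soothsayer_player_1 Soothsayer_player_2 out) := by unfold Spec_soothsayer; infer_instance

-- ===== CLAIM (what is proved, stated in full; the proofs are below) =====
def Claim_equal_soothsayer : Prop := ∀ (players_info : List (String × List String)) (Soothsayer_player_1 : String) (Soothsayer_player_2 : String), Dom_soothsayer players_info Soothsayer_player_1 Soothsayer_player_2 → Pre_soothsayer players_info Soothsayer_player_1 Soothsayer_player_2 → Spec_soothsayer players_info Soothsayer_player_1 Soothsayer_player_2 (soothsayer players_info Soothsayer_player_1 Soothsayer_player_2)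

-- ===== LEMMAS AND PROOFS =====

-- The index dict built by B's fold looks up to the FIRST entry whose v[0] equals the key.
theorem get?_fold_idx (l : List (String × List String)) (d : PySem.Dict String (String × List String)) (s : String) :
    (l.foldl (fun d kv =>
        let key := (PySem.List.pyGet? kv.2 0).getD ""
        if d.contains key then d else d.insert key (kv.1, kv.2)) d).get? s
      = ((d.get? s).or
          (((l.filter (fun kv => (PySem.List.pyGet? kv.2 0).getD "" == s)).head?).map (fun kv => (kv.1, kv.2)))) := by
  induction l generalizing d with
  | nil => simp
  | cons kv t ih =>
    simp only [List.foldl_cons, List.filter_cons]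
    rw [ih]
    by_cases hp : ((PySem.List.pyGet? kv.2 0).getD "" == s) = true
    · have hks : (PySem.List.pyGet? kv.2 0).getD "" = s := by simpa using hp
      simp only [hp, if_pos, List.head?_cons, Option.map_some]
      by_cases hc : PySem.Dict.contains d ((PySem.List.pyGet? kv.2 0).getD "") = true
      · have hsome : (d.get? s).isSome := by
          rw [← hks, ← PySem.Dict.contains_eq_isSome_get?]; exact hc
        simp only [hc, if_pos]
        obtain ⟨v, hv⟩ := Option.isSome_iff_exists.mp hsome
        simp [hv]
      · have hnone : d.get? s = none := by
          rw [← hks] at *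
          cases h : d.get? ((PySem.List.pyGet? kv.2 0).getD "") with
          | none => rfl
          | some v => exact absurd (by rw [PySem.Dict.contains_eq_isSome_get?, h]; rfl) hc
        simp only [hc, Bool.false_eq_true, if_false]
        rw [hks, PySem.Dict.get?_insert_self, hnone]
        simp
    · have hks : (PySem.List.pyGet? kv.2 0).getD "" ≠ s := by simpa using hp
      simp only [hp]
      by_cases hc : PySem.Dict.contains d ((PySem.List.pyGet? kv.2 0).getD "") = true
      · simp [hc]
      · simp only [hc, Bool.false_eq_true, if_false]
        rw [PySem.Dict.get?_insert_of_ne _ _ (fun h => hks h.symm)]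


theorem pred_congr (l : List (String × List String)) (hne : ∀ kv ∈ l, kv.2 ≠ []) (s : String) :
    l.filter (fun kv => (PySem.List.pyGet? kv.2 0).getD "" == s)
      = l.filter (fun kv => PySem.List.pyGet? kv.2 0 == some s) := by
  apply List.filter_congr
  intro kv hkv
  cases h : kv.2 with
  | nil => exact absurd h (hne kv hkv)
  | cons c cs => simp [pysem]

theorem filter_head (l : List (String × List String)) (s : String)
    (hex : ∃ kv ∈ l, kv.2.head? = some s) :
    ∃ kv1 t1, l.filter (fun kv => PySem.List.pyGet? kv.2 0 == some s) = kv1 :: t1 := by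
  obtain ⟨kv, hmem, hh⟩ := hex
  have hp : (PySem.List.pyGet? kv.2 0 == some s) = true := by
    cases h : kv.2 with
    | nil => rw [h] at hh; simp at hh
    | cons c cs => rw [h] at hh; simp at hh; simp [pysem, hh]
  have hmf : kv ∈ l.filter (fun kv => PySem.List.pyGet? kv.2 0 == some s) :=
    List.mem_filter.mpr ⟨hmem, hp⟩
  cases hf : l.filter (fun kv => PySem.List.pyGet? kv.2 0 == some s) with
  | nil => rw [hf] at hmf; simp at hmf
  | cons a b => exact ⟨a, b, rfl⟩

-- ===== VERDICT (by name: the statement is the Claim_ definition above) =====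
theorem soothsayer_spec : Claim_equal_soothsayer := by
  intro l s1 s2 _ hpre
  obtain ⟨hne, hex1, hex2, -⟩ := hpre
  obtain ⟨kv1, t1, hf1⟩ := filter_head l s1 hex1
  obtain ⟨kv2, t2, hf2⟩ := filter_head l s2 hex2
  unfold Spec_soothsayer soothsayer soothsayer_alt
  simp only [get?_fold_idx, pred_congr l hne, hf1, hf2, PySem.Dict.get?_empty,
    List.head?_cons, Option.map_some, List.map_cons]
  simp
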